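-- pv_equiv track=rewrite | github.com/nathansamson/Telepathy-Butterfly | butterfly/channel_manager.py | escape_as_identifier
-- ===== SOURCE A (Python) =====
-- from string import ascii_letters, digits
--
-- _ASCII_ALNUM = ascii_letters + digits
--
-- def escape_as_identifier(identifier):
--     """Escape the given string to be a valid D-Bus object path or service
--     name component, using a reversible encoding to ensure uniqueness.
--
--     The reversible encoding is as follows:
--
--     * The empty string becomes '_'
--     * Otherwise, each non-alphanumeric character is replaced by '_' plus
--       two lower-case hex digits; the same replacement is carried out on
--       the first character, if it's a digit
--     """
--     # '' -> '_'
--     if not identifier: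
--         return '_'
--
--     # A bit of a fast path for strings which are already OK.
--     # We deliberately omit '_' because, for reversibility, that must also
--     # be escaped.
--     if (identifier.strip(_ASCII_ALNUM) == '' and
--         identifier[0] in ascii_letters):
--         return identifier
--
--     # The first character may not be a digit
--     if identifier[0] not in ascii_letters:
--         ret = ['_%02x' % ord(identifier[0])]
--     else:
--         ret = [identifier[0]]
--
--     # Subsequent characters may be digits or ASCII letters
--     for c in identifier[1:]:
--         if c in _ASCII_ALNUM:
--             ret.append(c)
--         else:
--             ret.append('_%02x' % ord(c))
--
--     return ''.join(ret)
-- ===== SOURCE B (Python) =====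
-- from string import ascii_letters, digits
--
-- # translation table built once: every non-alphanumeric ASCII code point
-- # maps to its '_%02x' escape; alphanumerics (and anything unmapped) pass through
-- _ESC_TABLE = {cp: '_%02x' % cp for cp in range(128)
--               if chr(cp) not in ascii_letters + digits}
--
-- def escape_as_identifier(identifier):
--     if not identifier:
--         return '_'
--     first = identifier[0]
--     head = first if first in ascii_letters else '_%02x' % ord(first)
--     return head + identifier[1:].translate(_ESC_TABLE)
-- ===== Notes on version B (the rewrite author's own statement) =====
-- stated objective: idiomatic
-- what changed: Replaces A's strip()-based fast path and explicit accumulator loop with a first-character branch plus a single str.translate over a precomputed escape table, dropping the fast path entirely.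
import Mathlib
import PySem

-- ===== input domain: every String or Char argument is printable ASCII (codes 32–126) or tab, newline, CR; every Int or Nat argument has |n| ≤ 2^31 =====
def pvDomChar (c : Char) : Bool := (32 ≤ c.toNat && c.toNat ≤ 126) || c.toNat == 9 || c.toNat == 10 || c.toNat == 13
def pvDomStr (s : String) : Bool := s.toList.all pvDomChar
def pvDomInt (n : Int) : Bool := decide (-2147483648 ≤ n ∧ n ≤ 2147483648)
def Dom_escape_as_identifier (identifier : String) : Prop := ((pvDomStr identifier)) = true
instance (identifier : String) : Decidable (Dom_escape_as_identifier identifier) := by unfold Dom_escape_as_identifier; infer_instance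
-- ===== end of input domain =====

-- B replaces A's fast-path check plus explicit accumulator loop by a first-character
-- branch and a single str.translate over a precomputed escape table (objective: idiomatic).

-- helpers shared by both ports (both Pythons use string.ascii_letters/digits and '_%02x' % ord(c))
-- '_%02x' % ord(c): exact for code points below 256 (every Dom character is ≤ 126)
def pvHexDigit (n : Nat) : Char := if n < 10 then Char.ofNat (48 + n) else Char.ofNat (87 + n)
def pvEsc (c : Char) : List Char := ['_', pvHexDigit (c.toNat / 16), pvHexDigit (c.toNat % 16)]
def pvAsciiLetters : List Char := "abcdefghijklmnopqrstuvwxyzABCDEFGHIJKLMNOPQRSTUVWXYZ".toList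
def pvAsciiAlnum : List Char := pvAsciiLetters ++ "0123456789".toList

-- ===== PORT A =====
def escape_as_identifier (identifier : String) : String :=
  match identifier.toList with
  | [] => "_"                                  -- '' -> '_'
  | c0 :: rest =>
    -- fast path: identifier.strip(_ASCII_ALNUM) == '' and identifier[0] in ascii_letters
    if PySem.Chars.stripChars (c0 :: rest) pvAsciiAlnum = [] ∧ pvAsciiLetters.contains c0 = true then
      identifier
    else
      let ret0 : List (List Char) :=
        if !(pvAsciiLetters.contains c0) then [pvEsc c0] else [[c0]]
      let ret := rest.foldl (fun acc c =>
        acc ++ [if pvAsciiAlnum.contains c then [c] else pvEsc c]) ret0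
      String.ofList ret.flatten                -- ''.join(ret)

-- ===== PORT B =====
-- _ESC_TABLE lookup: code points < 128 that are not alphanumeric map to their escape,
-- everything else passes through (str.translate leaves unmapped characters unchanged)
def pvEscTable (c : Char) : List Char :=
  if c.toNat < 128 && !(pvAsciiAlnum.contains c) then pvEsc c else [c]

def escape_as_identifier_alt (identifier : String) : String :=
  match identifier.toList with
  | [] => "_"
  | first :: rest =>
    let head := if pvAsciiLetters.contains first then [first] else pvEsc first
    String.ofList (head ++ (rest.map pvEscTable).flatten)

-- ===== PRECONDITION & SPEC =====
def Spec_escape_as_identifier (identifier : String) (out : String) : Prop := out = escape_as_identifier_alt identifier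
instance (identifier : String) (out : String) : Decidable (Spec_escape_as_identifier identifier out) := by unfold Spec_escape_as_identifier; infer_instance

-- ===== CLAIM (what is proved, stated in full; the proofs are below) =====
def Claim_equal_escape_as_identifier : Prop := ∀ (identifier : String), Dom_escape_as_identifier identifier → Spec_escape_as_identifier identifier (escape_as_identifier identifier)

-- ===== LEMMAS AND PROOFS =====

-- a Dom character is below 128, so the table-condition reduces to the alnum test
theorem pvEscTable_eq_of_dom (c : Char) (h : pvDomChar c = true) :
    (if pvAsciiAlnum.contains c then [c] else pvEsc c) = pvEscTable c := by
  have hlt : c.toNat < 128 := by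
    simp [pvDomChar] at h
    omega
  unfold pvEscTable
  cases hc : pvAsciiAlnum.contains c <;> simp [hlt]

-- identifier.strip(_ASCII_ALNUM) == '' forces every character to be alphanumeric
theorem strip_nil_all (cs chars : List Char) (h : PySem.Chars.stripChars cs chars = []) :
    ∀ c ∈ cs, chars.contains c = true := by
  intro c hc
  simp only [PySem.Chars.stripChars, List.reverse_eq_nil_iff] at h
  rw [List.dropWhile_eq_nil_iff] at h
  rcases List.mem_append.mp
      (by rw [List.takeWhile_append_dropWhile]; exact hc :
        c ∈ List.takeWhile (fun c => chars.contains c) cs ++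
            List.dropWhile (fun c => chars.contains c) cs) with h1 | h1
  · exact List.mem_takeWhile_imp h1
  · exact h c (List.mem_reverse.mpr h1)

theorem flatten_map_singleton (l : List Char) : (l.map (fun c => [c])).flatten = l := by
  induction l with
  | nil => rfl
  | cons a t ih => simp [ih]

-- ===== VERDICT (by name: the statement is the Claim_ definition above) =====
theorem escape_as_identifier_spec : Claim_equal_escape_as_identifier := by
  intro s hdom
  unfold Spec_escape_as_identifier escape_as_identifier escape_as_identifier_alt
  rcases h : s.toList with _ | ⟨c0, rest⟩
  · rfl
  · simp only []
    have hdom' : ∀ c ∈ c0 :: rest, pvDomChar c = true := by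
      intro c hc
      have := hdom
      unfold Dom_escape_as_identifier pvDomStr at this
      rw [h, List.all_eq_true] at this
      exact this c hc
    by_cases hfast : PySem.Chars.stripChars (c0 :: rest) pvAsciiAlnum = [] ∧
        pvAsciiLetters.contains c0 = true
    · -- fast path of A: the string is returned unchanged; B rebuilds the same string
      obtain ⟨hstrip, hc0⟩ := hfast
      have hall := strip_nil_all _ _ hstrip
      rw [if_pos ⟨hstrip, hc0⟩]
      have hrest : rest.map pvEscTable = rest.map (fun c => [c]) := by
        apply List.map_congr_left
        intro c hc
        have hmem : pvAsciiAlnum.contains c = true := hall c (List.mem_cons_of_mem _ hc)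
        unfold pvEscTable
        rw [hmem]
        simp
      rw [hrest, if_pos hc0, flatten_map_singleton]
      have : String.ofList (c0 :: rest) = s := by rw [← h]; exact String.ofList_toList
      simp [this]
    · rw [if_neg hfast]
      simp only [PySem.List.foldl_append_singleton_eq_map]
      have hrest : rest.map (fun c => if pvAsciiAlnum.contains c then [c] else pvEsc c)
          = rest.map pvEscTable := by
        apply List.map_congr_left
        intro c hc
        exact pvEscTable_eq_of_dom c (hdom' c (List.mem_cons_of_mem _ hc))
      rw [hrest]
      cases hc0 : pvAsciiLetters.contains c0
      · simp
      · simp only [Bool.not_true, Bool.false_eq_true, if_false, if_true]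
        simp
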